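-- pv_equiv track=rewrite | github.com/subZiro/projecteuler | 5 task.py | f_Nom
-- ===== SOURCE A (Python) =====
-- def f_Nom(x):
-- 	list_dev = [11, 12, 13, 14, 16, 17, 18, 19, 20]
-- 	k = 0
-- 	for i in list_dev:
-- 		if not x % i:
-- 			k += 1
-- 		else:
-- 			break
-- 	if k == len(list_dev):
-- 		return True
-- 	else:
-- 		return False
-- ===== SOURCE B (Python) =====
-- def f_Nom(x):
-- 	# Divisible by all of [11,12,13,14,16,17,18,19,20] iff divisible by their LCM.
-- 	return x % 232792560 == 0
-- ===== Notes on version B (the rewrite author's own statement) =====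
-- stated objective: simpler
-- what changed: Replaces the counting loop with early break over the nine divisors by a single closed-form modulo test against their LCM 232792560.
import Mathlib
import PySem

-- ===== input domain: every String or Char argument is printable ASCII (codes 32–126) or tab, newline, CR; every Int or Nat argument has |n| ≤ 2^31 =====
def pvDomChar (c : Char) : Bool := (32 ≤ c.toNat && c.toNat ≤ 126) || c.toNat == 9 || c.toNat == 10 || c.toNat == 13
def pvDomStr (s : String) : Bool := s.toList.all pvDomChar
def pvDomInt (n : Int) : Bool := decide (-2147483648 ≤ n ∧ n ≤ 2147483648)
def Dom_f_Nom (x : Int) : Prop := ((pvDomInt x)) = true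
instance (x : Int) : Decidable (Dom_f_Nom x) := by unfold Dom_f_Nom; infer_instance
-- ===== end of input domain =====

-- ===== PORT A =====
-- B replaces A's counting loop over nine divisors by one modulo against their LCM (simpler closed form).
-- loop body of A: 'for i in list_dev: if not x % i: k += 1 else: break'
def f_NomGo (x : Int) : List Int → Int → Int
  | [], k => k
  | i :: rest, k => if PySem.Int.mod x i = 0 then f_NomGo x rest (k + 1) else k

def f_Nom (x : Int) : Bool :=
  let list_dev : List Int := [11, 12, 13, 14, 16, 17, 18, 19, 20]
  let k := f_NomGo x list_dev 0
  if k = (list_dev.length : Int) then true else false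

-- ===== PORT B =====
def f_Nom_alt (x : Int) : Bool :=
  PySem.Int.mod x 232792560 = 0

-- ===== PRECONDITION & SPEC =====
def Spec_f_Nom (x : Int) (out : Bool) : Prop := out = f_Nom_alt x
instance (x : Int) (out : Bool) : Decidable (Spec_f_Nom x out) := by unfold Spec_f_Nom; infer_instance

-- ===== CLAIM (what is proved, stated in full; the proofs are below) =====
def Claim_equal_f_Nom : Prop := ∀ (x : Int), Dom_f_Nom x → Spec_f_Nom x (f_Nom x)

-- ===== LEMMAS AND PROOFS =====

-- divisibility by every member of the list implies divisibility by the LCM 232792560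
theorem pv_dvd_lcm (x : Int)
    (h11 : (11:Int) ∣ x) (h12 : (12:Int) ∣ x) (h13 : (13:Int) ∣ x) (h14 : (14:Int) ∣ x)
    (h16 : (16:Int) ∣ x) (h17 : (17:Int) ∣ x) (h18 : (18:Int) ∣ x) (h19 : (19:Int) ∣ x)
    (h20 : (20:Int) ∣ x) : (232792560:Int) ∣ x := by
  have h9 : (9:Int) ∣ x := dvd_trans (by decide) h18
  have h5 : (5:Int) ∣ x := dvd_trans (by decide) h20
  have h7 : (7:Int) ∣ x := dvd_trans (by decide) h14
  have c1 : IsCoprime (16:Int) 9 := Int.isCoprime_iff_gcd_eq_one.mpr (by decide)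
  have d1 : (144:Int) ∣ x := by have := c1.mul_dvd h16 h9; norm_num at this; exact this
  have c2 : IsCoprime (144:Int) 5 := Int.isCoprime_iff_gcd_eq_one.mpr (by decide)
  have d2 : (720:Int) ∣ x := by have := c2.mul_dvd d1 h5; norm_num at this; exact this
  have c3 : IsCoprime (720:Int) 7 := Int.isCoprime_iff_gcd_eq_one.mpr (by decide)
  have d3 : (5040:Int) ∣ x := by have := c3.mul_dvd d2 h7; norm_num at this; exact this
  have c4 : IsCoprime (5040:Int) 11 := Int.isCoprime_iff_gcd_eq_one.mpr (by decide)
  have d4 : (55440:Int) ∣ x := by have := c4.mul_dvd d3 h11; norm_num at this; exact this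
  have c5 : IsCoprime (55440:Int) 13 := Int.isCoprime_iff_gcd_eq_one.mpr (by decide)
  have d5 : (720720:Int) ∣ x := by have := c5.mul_dvd d4 h13; norm_num at this; exact this
  have c6 : IsCoprime (720720:Int) 17 := Int.isCoprime_iff_gcd_eq_one.mpr (by decide)
  have d6 : (12252240:Int) ∣ x := by have := c6.mul_dvd d5 h17; norm_num at this; exact this
  have c7 : IsCoprime (12252240:Int) 19 := Int.isCoprime_iff_gcd_eq_one.mpr (by decide)
  have := c7.mul_dvd d6 h19; norm_num at this; exact this

theorem pv_lcm_dvd (x : Int) (i : Int) (hi : i ∣ (232792560:Int))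
    (h : (232792560:Int) ∣ x) : i ∣ x := dvd_trans hi h

theorem pv_eq (x : Int) : f_Nom x = f_Nom_alt x := by
  simp only [f_Nom, f_Nom_alt, f_NomGo, PySem.Int.mod_eq_zero_iff_dvd]
  by_cases hL : (232792560:Int) ∣ x
  · have h11 := pv_lcm_dvd x 11 (by decide) hL
    have h12 := pv_lcm_dvd x 12 (by decide) hL
    have h13 := pv_lcm_dvd x 13 (by decide) hL
    have h14 := pv_lcm_dvd x 14 (by decide) hL
    have h16 := pv_lcm_dvd x 16 (by decide) hL
    have h17 := pv_lcm_dvd x 17 (by decide) hL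
    have h18 := pv_lcm_dvd x 18 (by decide) hL
    have h19 := pv_lcm_dvd x 19 (by decide) hL
    have h20 := pv_lcm_dvd x 20 (by decide) hL
    simp [h11, h12, h13, h14, h16, h17, h18, h19, h20, hL]
  · simp only [List.length_cons, List.length_nil]
    split_ifs with a1 a2 a3 a4 a5 a6 a7 a8 a9
    · exact absurd (pv_dvd_lcm x a1 a2 a3 a4 a5 a6 a7 a8 a9) hL
    all_goals simp_all
    all_goals omega

-- ===== VERDICT (by name: the statement is the Claim_ definition above) =====
theorem f_Nom_spec : Claim_equal_f_Nom := by
  intro x _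
  unfold Spec_f_Nom
  exact pv_eq x
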